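-- pv_equiv track=rewrite | github.com/javierlaria/cryptography_qblcrypt | 03_transposition_and_encoding_machines/route_cypher.py | read_diagonal
-- ===== SOURCE A (Python) =====
-- def read_diagonal(grid):
--     """Read grid diagonally"""
--     result = ""
--     path = []
--     rows, cols = len(grid), len(grid[0])
--
--     # Start from top-left, read main diagonal and parallel diagonals
--     for start_col in range(cols):
--         row, col = 0, start_col
--         while row < rows and col < cols:
--             result += grid[row][col]
--             path.append((row, col))
--             row += 1
--             col += 1
--
--     for start_row in range(1, rows):
--         row, col = start_row, 0
--         while row < rows and col < cols:
--             result += grid[row][col]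
--             path.append((row, col))
--             row += 1
--             col += 1
--
--     return result, path
-- ===== SOURCE B (Python) =====
-- def read_diagonal(grid):
--     """Read grid diagonally"""
--     rows, cols = len(grid), len(grid[0])
--     buckets = {}
--     for i in range(rows):
--         for j in range(cols):
--             buckets.setdefault(j - i, []).append((i, j))
--     chars = []
--     path = []
--     for d in list(range(cols)) + list(range(-1, -rows, -1)):
--         for (i, j) in buckets.get(d, []):
--             chars.append(grid[i][j])
--             path.append((i, j))
--     return "".join(chars), path
-- ===== Notes on version B (the rewrite author's own statement) =====
-- stated objective: alternative
-- what changed: Replaces A's two families of diagonal-walking while-loops by a single pass over all cells that groups them into dict buckets keyed by j-i, then emits the buckets in the original diagonal order (0..cols-1, then -1 down to -(rows-1)).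
import Mathlib
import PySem

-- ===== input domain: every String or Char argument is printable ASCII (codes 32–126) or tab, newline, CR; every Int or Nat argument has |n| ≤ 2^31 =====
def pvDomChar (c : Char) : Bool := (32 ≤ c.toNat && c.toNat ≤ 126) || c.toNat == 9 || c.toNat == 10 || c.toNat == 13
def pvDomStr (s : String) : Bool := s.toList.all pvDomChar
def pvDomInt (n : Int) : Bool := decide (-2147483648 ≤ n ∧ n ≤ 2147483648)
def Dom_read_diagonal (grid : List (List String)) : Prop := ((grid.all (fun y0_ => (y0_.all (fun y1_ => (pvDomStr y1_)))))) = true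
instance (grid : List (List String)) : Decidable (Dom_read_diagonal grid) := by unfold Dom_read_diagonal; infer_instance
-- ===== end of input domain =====

-- B groups all cells into buckets keyed by j-i in one pass over the grid and then emits the
-- buckets in the original diagonal order, instead of A's two families of diagonal-walking
-- while-loops (alternative decomposition, same cost).

-- ===== PORT A =====
-- grid[i][j]  (both indexes are in range on every cell the loops visit, for inputs in Pre_)
def pvCell (grid : List (List String)) (i j : Int) : String :=
  PySem.List.pyGetD (PySem.List.pyGetD grid i []) j ""

-- the 'while row < rows and col < cols' loop of A, accumulating result (as chars) and path
def pvWhileA (grid : List (List String)) (rows cols row col : Int)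
    (res : List Char) (path : List (Int × Int)) : List Char × List (Int × Int) :=
  if h : row < rows ∧ col < cols then
    pvWhileA grid rows cols (row + 1) (col + 1)
      (res ++ (pvCell grid row col).toList) (path ++ [(row, col)])
  else (res, path)
termination_by (rows - row).toNat
decreasing_by omega

def read_diagonal (grid : List (List String)) : String × (List (Int × Int)) :=
  let rows : Int := grid.length
  let cols : Int := (PySem.List.pyGetD grid 0 []).length
  let s1 := (PySem.List.pyRange 0 cols 1).foldl
    (fun st s => pvWhileA grid rows cols 0 s st.1 st.2) ([], [])
  let s2 := (PySem.List.pyRange 1 rows 1).foldl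
    (fun st r => pvWhileA grid rows cols r 0 st.1 st.2) s1
  (String.ofList s2.1, s2.2)

-- ===== PORT B =====
def read_diagonal_alt (grid : List (List String)) : String × (List (Int × Int)) :=
  let rows : Int := grid.length
  let cols : Int := (PySem.List.pyGetD grid 0 []).length
  -- one pass over all cells: buckets.setdefault(j - i, []).append((i, j))
  let buckets : PySem.Dict Int (List (Int × Int)) :=
    (PySem.List.pyRange 0 rows 1).foldl (fun b i =>
      (PySem.List.pyRange 0 cols 1).foldl (fun b j =>
        b.modify (j - i) [] (· ++ [(i, j)])) b)
      PySem.Dict.empty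
  -- emit the buckets in the original diagonal order
  let st := (PySem.List.pyRange 0 cols 1 ++ PySem.List.pyRange (-1) (-rows) (-1)).foldl
    (fun st d => (buckets.getD d []).foldl
      (fun st p => (st.1 ++ [pvCell grid p.1 p.2], st.2 ++ [p])) st)
    (([] : List String), ([] : List (Int × Int)))
  (PySem.Str.join "" st.1, st.2)

-- ===== PRECONDITION & SPEC =====
-- Pre_ excludes exactly the inputs where the Python A raises IndexError: the empty grid
-- (grid[0]) and ragged grids with a row shorter than the first row (grid[row][col]).
def Pre_read_diagonal (grid : List (List String)) : Prop :=
  grid ≠ [] ∧ ∀ r ∈ grid, (grid.headD []).length ≤ r.length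
instance (grid : List (List String)) : Decidable (Pre_read_diagonal grid) := by
  unfold Pre_read_diagonal; infer_instance
def pvWitness_read_diagonal : List (List String) := [["a", "b"], ["c", "d"]]

def Spec_read_diagonal (grid : List (List String)) (out : String × (List (Int × Int))) : Prop := out = read_diagonal_alt grid
instance (grid : List (List String)) (out : String × (List (Int × Int))) : Decidable (Spec_read_diagonal grid out) := by unfold Spec_read_diagonal; infer_instance

-- ===== CLAIM (what is proved, stated in full; the proofs are below) =====
def Claim_equal_read_diagonal : Prop := ∀ (grid : List (List String)), Dom_read_diagonal grid → Pre_read_diagonal grid → Spec_read_diagonal grid (read_diagonal grid)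

-- ===== LEMMAS AND PROOFS =====

-- the (row', col') cells of one diagonal, walked from (row, col)
def pvSeg (rows cols row col : Int) : List (Int × Int) :=
  (PySem.List.pyRange 0 (min (rows - row) (cols - col)) 1).map (fun t => (row + t, col + t))

-- all cells of the full diagonal reading, in A's emission order
def pvBig (rows cols : Int) : List (Int × Int) :=
  (PySem.List.pyRange 0 cols 1).flatMap (fun s => pvSeg rows cols 0 s)
    ++ (PySem.List.pyRange 1 rows 1).flatMap (fun r => pvSeg rows cols r 0)

lemma pvSeg_nil (rows cols row col : Int) (h : ¬(row < rows ∧ col < cols)) :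
    pvSeg rows cols row col = [] := by
  unfold pvSeg
  rw [PySem.List.pyRange_one_eq_nil (by omega)]
  rfl

lemma pvSeg_cons (rows cols row col : Int) (h1 : row < rows) (h2 : col < cols) :
    pvSeg rows cols row col = (row, col) :: pvSeg rows cols (row + 1) (col + 1) := by
  unfold pvSeg
  rw [PySem.List.pyRange_one_cons (by omega)]
  have hm : min (rows - (row + 1)) (cols - (col + 1)) = min (rows - row) (cols - col) - 1 := by
    omega
  rw [hm]
  simp only [List.map_cons, add_zero]
  congr 1
  rw [PySem.List.pyRange_one, PySem.List.pyRange_one]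
  have : (min (rows - row) (cols - col) - 1 - 0).toNat
      = (min (rows - row) (cols - col) - (0 + 1)).toNat := by omega
  rw [this]
  simp only [List.map_map]
  apply List.map_congr_left
  intro k _
  simp only [Function.comp_apply, Prod.mk.injEq]
  constructor <;> ring

lemma pvWhileA_eq (grid : List (List String)) (rows cols : Int) :
    ∀ row col res path, pvWhileA grid rows cols row col res path
      = (res ++ (pvSeg rows cols row col).flatMap (fun p => (pvCell grid p.1 p.2).toList),
         path ++ pvSeg rows cols row col) := by
  intro row col res path
  fun_induction pvWhileA grid rows cols row col res path with
  | case1 row col res path h ih =>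
    rw [pvSeg_cons rows cols row col h.1 h.2, ih]
    simp
  | case2 row col res path h =>
    rw [pvSeg_nil rows cols row col h]
    simp

-- a fold appending to both components of a pair
lemma pvFoldPair {α β γ : Type} (f : α → List β) (g : α → List γ) :
    ∀ (ds : List α) (u : List β) (v : List γ),
      ds.foldl (fun st x => (st.1 ++ f x, st.2 ++ g x)) (u, v)
        = (u ++ ds.flatMap f, v ++ ds.flatMap g) := by
  intro ds
  induction ds with
  | nil => simp
  | cons d ds ih => intro u v; simp [ih]

lemma pvFlattenIntersperseNil : ∀ (l : List (List Char)),
    (List.intersperse [] l).flatten = l.flatten := by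
  intro l
  induction l with
  | nil => rfl
  | cons a t ih =>
    cases t with
    | nil => rfl
    | cons b t2 =>
      simp only [List.intersperse] at ih ⊢
      rw [List.flatten_cons, List.flatten_cons, ih]
      simp

-- ''.join(parts) is the concatenation of the parts
lemma pvJoin (parts : List String) :
    PySem.Str.join "" parts = String.ofList (parts.flatMap String.toList) := by
  have h : (PySem.Str.join "" parts).toList = parts.flatMap String.toList := by
    simp [PySem.Str.join, PySem.Chars.join, List.intercalate, pvFlattenIntersperseNil,
      List.flatMap_def]
  rw [← h, String.ofList_toList]

-- A's result, in canonical form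
lemma pvA_eq (grid : List (List String)) :
    read_diagonal grid
      = (String.ofList ((pvBig grid.length (PySem.List.pyGetD grid 0 []).length).flatMap
            (fun p => (pvCell grid p.1 p.2).toList)),
         pvBig grid.length (PySem.List.pyGetD grid 0 []).length) := by
  unfold read_diagonal pvBig
  simp only [pvWhileA_eq]
  rw [pvFoldPair (fun s => (pvSeg (grid.length : Int) ((PySem.List.pyGetD grid 0 []).length : Int) 0 s).flatMap (fun p => (pvCell grid p.1 p.2).toList)) (fun s => pvSeg (grid.length : Int) ((PySem.List.pyGetD grid 0 []).length : Int) 0 s)]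
  rw [pvFoldPair (fun r => (pvSeg (grid.length : Int) ((PySem.List.pyGetD grid 0 []).length : Int) r 0).flatMap (fun p => (pvCell grid p.1 p.2).toList)) (fun r => pvSeg (grid.length : Int) ((PySem.List.pyGetD grid 0 []).length : Int) r 0)]
  simp [List.flatMap_assoc]

-- the nested bucket-building fold, flattened to one fold over all (key, cell) pairs
lemma pvBuckets_flat (rows cols : Int) (e : PySem.Dict Int (List (Int × Int))) :
    (PySem.List.pyRange 0 rows 1).foldl (fun b i =>
        (PySem.List.pyRange 0 cols 1).foldl (fun b j =>
          b.modify (j - i) [] (· ++ [(i, j)])) b) e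
      = ((PySem.List.pyRange 0 rows 1).flatMap (fun i =>
            (PySem.List.pyRange 0 cols 1).map (fun j => (j - i, (i, j))))).foldl
          (fun b p => b.modify p.1 [] (· ++ [p.2])) e := by
  induction (PySem.List.pyRange 0 rows 1) generalizing e with
  | nil => rfl
  | cons x xs ih =>
    simp only [List.foldl_cons, List.flatMap_cons, List.foldl_append, List.foldl_map]
    rw [ih]

-- a filter of a unit-step range by equality with a fixed value
lemma pvRange_filter_eq (v : Int) :
    ∀ (a b : Int), (PySem.List.pyRange a b 1).filter (fun j => j == v)
      = if a ≤ v ∧ v < b then [v] else [] := by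
  intro a b
  by_cases hab : b ≤ a
  · rw [PySem.List.pyRange_one_eq_nil hab]
    rw [if_neg (by omega)]
    rfl
  · have hlt : a < b := by omega
    rw [PySem.List.pyRange_one_cons hlt]
    have hrec := pvRange_filter_eq v (a + 1) b
    by_cases hv : a = v
    · subst hv
      simp only [List.filter_cons, BEq.rfl, if_pos (by omega : a ≤ a ∧ a < b)]
      simp only [hrec, if_neg (by omega : ¬(a + 1 ≤ a ∧ a < b))]
      rfl
    · rw [List.filter_cons_of_neg (by simp [hv])]
      rw [hrec]
      by_cases hin : a + 1 ≤ v ∧ v < b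
      · rw [if_pos hin, if_pos (by omega)]
      · rw [if_neg hin, if_neg (by omega)]
termination_by a b => (b - a).toNat
decreasing_by omega

-- a flatMap producing a guarded singleton is a filter-then-map
lemma pvFlatMapIf {β : Type} (g : Int → β) (P : Int → Prop) [DecidablePred P] :
    ∀ (l : List Int), l.flatMap (fun i => if P i then [g i] else [])
      = (l.filter (fun i => decide (P i))).map g := by
  intro l
  induction l with
  | nil => rfl
  | cons x xs ih =>
    by_cases h : P x
    · simp [h, ih]
    · simp [h, ih]

-- a filter of a unit-step range by an interval condition
lemma pvRange_filter_interval (lo hi : Int) :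
    ∀ (a b : Int), (PySem.List.pyRange a b 1).filter (fun i => decide (lo ≤ i ∧ i < hi))
      = PySem.List.pyRange (max a lo) (min b hi) 1 := by
  intro a b
  by_cases hab : b ≤ a
  · rw [PySem.List.pyRange_one_eq_nil hab, PySem.List.pyRange_one_eq_nil (by omega)]
    rfl
  · have hlt : a < b := by omega
    rw [PySem.List.pyRange_one_cons hlt]
    have hrec := pvRange_filter_interval lo hi (a + 1) b
    by_cases h : lo ≤ a ∧ a < hi
    · rw [List.filter_cons_of_pos (by simpa using h), hrec]
      have h1 : max a lo = a := by omega
      have h2 : max (a + 1) lo = a + 1 := by omega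
      have hmin : a < min b hi := by omega
      rw [h1, h2, PySem.List.pyRange_one_cons hmin]
    · rw [List.filter_cons_of_neg (by simpa using h), hrec]
      by_cases hl : a < lo
      · have : max (a + 1) lo = max a lo := by omega
        rw [this]
      · rw [PySem.List.pyRange_one_eq_nil (by omega),
          PySem.List.pyRange_one_eq_nil (by omega)]
termination_by a b => (b - a).toNat
decreasing_by omega

-- what each bucket holds: exactly the cells of one diagonal, in walk order
lemma pvBucket_val (rows cols d : Int) :
    (((PySem.List.pyRange 0 rows 1).flatMap (fun i =>
          (PySem.List.pyRange 0 cols 1).map (fun j => (j - i, (i, j))))).filter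
        (fun p => p.1 == d)).map (·.2)
      = pvSeg rows cols (max 0 (-d)) (max 0 d) := by
  rw [List.filter_flatMap, List.map_flatMap]
  have hinner : ∀ i : Int,
      ((((PySem.List.pyRange 0 cols 1).map (fun j => (j - i, (i, j)))).filter
          (fun p => p.1 == d)).map (·.2))
        = if 0 ≤ i + d ∧ i + d < cols then [(i, i + d)] else [] := by
    intro i
    rw [List.filter_map]
    have hp : ((PySem.List.pyRange 0 cols 1).filter
          ((fun p : Int × (Int × Int) => p.1 == d) ∘ (fun j => (j - i, (i, j)))))
        = (PySem.List.pyRange 0 cols 1).filter (fun j => j == i + d) := by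
      apply List.filter_congr
      intro j _
      simp only [Function.comp_apply]
      by_cases h : j = i + d
      · simp [h]
      · have h1 : (j - i == d) = false := by
          simp only [beq_eq_false_iff_ne, ne_eq]
          omega
        have h2 : (j == i + d) = false := by
          simp only [beq_eq_false_iff_ne, ne_eq]
          omega
        rw [h1, h2]
    rw [hp, pvRange_filter_eq (i + d) 0 cols]
    by_cases h : 0 ≤ i + d ∧ i + d < cols
    · rw [if_pos h, if_pos h]
      simp
    · rw [if_neg h, if_neg h]
      rfl
  calc (PySem.List.pyRange 0 rows 1).flatMap (fun i =>
          (((PySem.List.pyRange 0 cols 1).map (fun j => (j - i, (i, j)))).filter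
            (fun p => p.1 == d)).map (·.2))
      = (PySem.List.pyRange 0 rows 1).flatMap
          (fun i => if 0 ≤ i + d ∧ i + d < cols then [(i, i + d)] else []) := by
        exact List.flatMap_congr (fun i _ => hinner i)
    _ = (((PySem.List.pyRange 0 rows 1).filter
            (fun i => decide (0 ≤ i + d ∧ i + d < cols))).map (fun i => (i, i + d))) := by
        exact pvFlatMapIf _ _ _
    _ = (((PySem.List.pyRange 0 rows 1).filter
            (fun i => decide (-d ≤ i ∧ i < cols - d))).map (fun i => (i, i + d))) := by
        congr 1
        apply List.filter_congr
        intro i _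
        simp only [decide_eq_decide]
        omega
    _ = (PySem.List.pyRange (max 0 (-d)) (min rows (cols - d)) 1).map (fun i => (i, i + d)) := by
        rw [pvRange_filter_interval]
    _ = pvSeg rows cols (max 0 (-d)) (max 0 d) := by
        unfold pvSeg
        rw [PySem.List.pyRange_one, PySem.List.pyRange_one]
        have : (min rows (cols - d) - max 0 (-d)).toNat
            = (min (rows - max 0 (-d)) (cols - max 0 d) - 0).toNat := by omega
        rw [this]
        simp only [List.map_map]
        apply List.map_congr_left
        intro k _
        simp only [Function.comp_apply, Prod.mk.injEq]
        constructor <;> omega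

-- B's diagonal-key order, flattened, is A's emission order
lemma pvOrder_eq (rows cols : Int) :
    (PySem.List.pyRange 0 cols 1 ++ PySem.List.pyRange (-1) (-rows) (-1)).flatMap
        (fun d => pvSeg rows cols (max 0 (-d)) (max 0 d))
      = pvBig rows cols := by
  rw [List.flatMap_append]
  unfold pvBig
  congr 1
  · apply List.flatMap_congr
    intro d hd
    rw [PySem.List.mem_pyRange_one] at hd
    have h1 : max 0 (-d) = 0 := by omega
    have h2 : max 0 d = d := by omega
    rw [h1, h2]
  · rw [PySem.List.pyRange_neg_one, PySem.List.pyRange_one]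
    have : ((-1 : Int) - -rows).toNat = (rows - 1).toNat := by omega
    rw [this]
    rw [List.flatMap_map, List.flatMap_map]
    apply List.flatMap_congr
    intro k _
    have h1 : max 0 (-(-1 - (k : Int))) = 1 + (k : Int) := by omega
    have h2 : max 0 ((-1 : Int) - (k : Int)) = 0 := by omega
    rw [h1, h2]

-- B's result, in the same canonical form
lemma pvB_eq (grid : List (List String)) :
    read_diagonal_alt grid
      = (String.ofList ((pvBig grid.length (PySem.List.pyGetD grid 0 []).length).flatMap
            (fun p => (pvCell grid p.1 p.2).toList)),
         pvBig grid.length (PySem.List.pyGetD grid 0 []).length) := by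
  unfold read_diagonal_alt
  simp only [pvBuckets_flat]
  have hb : ∀ d : Int,
      ((((PySem.List.pyRange 0 (grid.length : Int) 1).flatMap (fun i =>
          (PySem.List.pyRange 0 ((PySem.List.pyGetD grid 0 []).length : Int) 1).map
            (fun j => (j - i, (i, j))))).foldl
        (fun b p => b.modify p.1 [] (· ++ [p.2])) PySem.Dict.empty).getD d [])
      = pvSeg (grid.length : Int) ((PySem.List.pyGetD grid 0 []).length : Int)
          (max 0 (-d)) (max 0 d) := by
    intro d
    rw [PySem.Dict.getD_foldl_modify_append, PySem.Dict.getD_empty, pvBucket_val]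
    rfl
  simp only [hb]
  have hInner : ∀ (l : List (Int × Int)) (st : List String × List (Int × Int)),
      l.foldl (fun st p => (st.1 ++ [pvCell grid p.1 p.2], st.2 ++ [p])) st
        = (st.1 ++ l.map (fun p => pvCell grid p.1 p.2), st.2 ++ l) := by
    intro l st
    obtain ⟨u, v⟩ := st
    rw [pvFoldPair (fun p : Int × Int => [pvCell grid p.1 p.2]) (fun p : Int × Int => [p])]
    simp [← List.map_eq_flatMap]
  simp only [hInner]
  rw [pvFoldPair
    (fun d => (pvSeg (grid.length : Int) ((PySem.List.pyGetD grid 0 []).length : Int)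
        (max 0 (-d)) (max 0 d)).map (fun p => pvCell grid p.1 p.2))
    (fun d => pvSeg (grid.length : Int) ((PySem.List.pyGetD grid 0 []).length : Int)
        (max 0 (-d)) (max 0 d))]
  have hflat := pvOrder_eq (grid.length : Int) ((PySem.List.pyGetD grid 0 []).length : Int)
  have hmap : (PySem.List.pyRange 0 ((PySem.List.pyGetD grid 0 []).length : Int) 1
        ++ PySem.List.pyRange (-1) (-(grid.length : Int)) (-1)).flatMap
      (fun d => (pvSeg (grid.length : Int) ((PySem.List.pyGetD grid 0 []).length : Int)
          (max 0 (-d)) (max 0 d)).map (fun p => pvCell grid p.1 p.2))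
      = (pvBig (grid.length : Int) ((PySem.List.pyGetD grid 0 []).length : Int)).map
          (fun p => pvCell grid p.1 p.2) := by
    rw [← hflat, List.map_flatMap]
  simp only [hmap, hflat, List.nil_append]
  rw [pvJoin, List.flatMap_map]

-- ===== VERDICT (by name: the statement is the Claim_ definition above) =====
theorem read_diagonal_spec : Claim_equal_read_diagonal := by
  intro grid _ _
  unfold Spec_read_diagonal
  rw [pvA_eq, pvB_eq]
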